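-- pv_equiv track=rewrite | github.com/microsoft/taccl | taccl/cli/common.py | _filter_links
-- ===== SOURCE A (Python) =====
-- def _filter_links(links, conn):
--     new_links = [
--         [
--             links[dst][src]
--             if src in conn and dst in conn[src]
--             else 0
--             for src in range(len(links))
--         ] for dst in range(len(links[0]))
--     ]
--     return new_links
-- ===== SOURCE B (Python) =====
-- def _filter_links(links, conn):
--     # Edge-driven alternative: fill a zero matrix from the conn adjacency map,
--     # instead of membership-testing every (src, dst) cell.
--     n_src = len(links)
--     n_dst = len(links[0])
--     new_links = [[0] * n_src for _ in range(n_dst)]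
--     for src, dsts in conn.items():
--         if 0 <= src < n_src:
--             for dst in dsts:
--                 if 0 <= dst < n_dst:
--                     new_links[dst][src] = links[dst][src]
--     return new_links
-- ===== Notes on version B (the rewrite author's own statement) =====
-- stated objective: alternative
-- what changed: Instead of a dense double comprehension that membership-tests conn for every (src,dst) cell, B allocates a zero matrix once and fills only the connected cells by iterating the conn adjacency map; it trades per-cell tests for per-edge writes (a win only when conn is sparse, so no speed is claimed).
import Mathlib
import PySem

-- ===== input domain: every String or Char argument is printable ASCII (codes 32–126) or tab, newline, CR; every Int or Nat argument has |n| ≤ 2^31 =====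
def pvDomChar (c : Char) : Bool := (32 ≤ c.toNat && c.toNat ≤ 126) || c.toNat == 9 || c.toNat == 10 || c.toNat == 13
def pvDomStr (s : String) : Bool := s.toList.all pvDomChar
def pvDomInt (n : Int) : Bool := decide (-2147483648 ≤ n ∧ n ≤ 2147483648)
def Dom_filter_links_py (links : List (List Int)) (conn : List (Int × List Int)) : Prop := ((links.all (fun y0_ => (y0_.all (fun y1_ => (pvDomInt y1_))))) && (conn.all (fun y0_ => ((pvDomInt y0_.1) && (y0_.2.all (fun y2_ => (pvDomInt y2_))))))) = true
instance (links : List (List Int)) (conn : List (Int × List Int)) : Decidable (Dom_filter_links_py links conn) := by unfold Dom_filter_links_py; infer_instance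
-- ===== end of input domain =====

-- B fills a zero matrix from the conn adjacency map instead of membership-testing every cell (an alternative, edge-driven decomposition); return-value equivalence on Pre_ (A raises outside it).


-- ===== PORT A =====
-- links[dst][src] is in range for every connected cell inside Pre_; the getD defaults are never reached there.
def filter_links_py (links : List (List Int)) (conn : List (Int × List Int)) : List (List Int) :=
  (List.range (links.getD 0 []).length).map (fun dst =>
    (List.range links.length).map (fun src =>
      match conn.lookup ((src : Nat) : Int) with      -- `src in conn and dst in conn[src]`
      | some dsts =>
          if ((dst : Nat) : Int) ∈ dsts then (links.getD dst []).getD src 0 else 0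
      | none => 0))

-- ===== PORT B =====
-- new_links[dst][src] = links[dst][src]  (in-place write on the zero matrix)
def pvSetCell (m : List (List Int)) (dst src : Nat) (v : Int) : List (List Int) :=
  m.set dst ((m.getD dst []).set src v)

def filter_links_py_alt (links : List (List Int)) (conn : List (Int × List Int)) : List (List Int) :=
  let nsrc := links.length
  let ndst := (links.getD 0 []).length
  let init := List.replicate ndst (List.replicate nsrc (0 : Int))
  conn.foldl (fun m p =>
    if 0 ≤ p.1 ∧ p.1 < (nsrc : Int) then
      p.2.foldl (fun m d =>
        if 0 ≤ d ∧ d < (ndst : Int) then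
          pvSetCell m d.toNat p.1.toNat ((links.getD d.toNat []).getD p.1.toNat 0)
        else m) m
    else m) init

-- ===== PRECONDITION & SPEC =====
-- Pre_ excludes exactly (i) inputs on which the Python A raises IndexError (empty links, or a
-- connected cell (src,dst) whose links[dst][src] access is out of range), and (ii) association
-- lists with duplicate keys, which never arise from a Python dict (the dict invariant).
def Pre_filter_links_py (links : List (List Int)) (conn : List (Int × List Int)) : Prop :=
  links ≠ [] ∧ (conn.map Prod.fst).Nodup ∧
  ∀ p ∈ conn, 0 ≤ p.1 → p.1 < (links.length : Int) →
    ∀ d ∈ p.2, 0 ≤ d → d < ((links.getD 0 []).length : Int) →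
      d < (links.length : Int) ∧ p.1 < (((links.getD d.toNat []).length : Nat) : Int)
instance (links : List (List Int)) (conn : List (Int × List Int)) : Decidable (Pre_filter_links_py links conn) := by unfold Pre_filter_links_py; infer_instance

def pvWitness_filter_links_py : List (List Int) × (List (Int × List Int)) :=
  ([[1, 2], [3, 4]], [(0, [1]), (1, [0, 1])])

def Spec_filter_links_py (links : List (List Int)) (conn : List (Int × List Int)) (out : List (List Int)) : Prop := out = filter_links_py_alt links conn
instance (links : List (List Int)) (conn : List (Int × List Int)) (out : List (List Int)) : Decidable (Spec_filter_links_py links conn out) := by unfold Spec_filter_links_py; infer_instance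

-- ===== CLAIM (what is proved, stated in full; the proofs are below) =====
def Claim_equal_filter_links_py : Prop := ∀ (links : List (List Int)) (conn : List (Int × List Int)), Dom_filter_links_py links conn → Pre_filter_links_py links conn → Spec_filter_links_py links conn (filter_links_py links conn)

-- ===== LEMMAS AND PROOFS =====

-- the (d,s) entry of a matrix, with 0 as the out-of-range default
def pvCell (m : List (List Int)) (d s : Nat) : Int := (m.getD d []).getD s 0

-- shape: exactly ndst rows of nsrc entries each
def pvShape (ndst nsrc : Nat) (m : List (List Int)) : Prop :=
  m.length = ndst ∧ ∀ d < ndst, (m.getD d []).length = nsrc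

lemma pvGetD_set (m : List (List Int)) (d i : Nat) (r : List Int) :
    (m.set d r).getD i [] = if d = i ∧ d < m.length then r else m.getD i [] := by
  simp only [List.getD, List.getElem?_set]
  split_ifs with h1 h2 h3 h4 <;> simp_all <;> omega

lemma pvGetD_set' (r : List Int) (s i : Nat) (v : Int) :
    (r.set s v).getD i 0 = if s = i ∧ s < r.length then v else r.getD i 0 := by
  simp only [List.getD, List.getElem?_set]
  split_ifs with h1 h2 h3 h4 <;> simp_all <;> omega

lemma pvShape_set (ndst nsrc : Nat) (m : List (List Int)) (d s : Nat) (v : Int)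
    (h : pvShape ndst nsrc m) : pvShape ndst nsrc (pvSetCell m d s v) := by
  obtain ⟨h1, h2⟩ := h
  refine ⟨by simp [pvSetCell, h1], ?_⟩
  intro d' hd'
  rw [pvSetCell, pvGetD_set]
  split_ifs with hc
  · simpa [hc.1] using h2 d' hd'
  · exact h2 d' hd'

lemma pvCell_set (m : List (List Int)) (d s d' s' : Nat) (v : Int)
    (hd : d < m.length) (hs : s < (m.getD d []).length) :
    pvCell (pvSetCell m d s v) d' s' = if d = d' ∧ s = s' then v else pvCell m d' s' := by
  unfold pvCell pvSetCell
  rw [pvGetD_set]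
  split_ifs with h1 h2 h2
  · rw [pvGetD_set', if_pos ⟨h2.2, hs⟩]
  · have hss : ¬ (s = s') := fun hss => h2 ⟨h1.1, hss⟩
    rw [pvGetD_set', if_neg (fun hc => hss hc.1)]
    simp [h1.1]
  · exact absurd ⟨h2.1, hd⟩ h1
  · rfl

-- whether B writes cell (d,s): some conn entry keyed s carries d (range guards included)
def pvConnB (conn : List (Int × List Int)) (nsrc ndst : Nat) (s d : Nat) : Bool :=
  conn.any (fun p => p.1 == (s : Int) && decide (s < nsrc) && p.2.contains ((d : Nat) : Int) && decide (d < ndst))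

-- named copies of B's loop bodies (rfl-equal to the lambdas in filter_links_py_alt)
def pvInnerStep (links : List (List Int)) (k : Int) (m : List (List Int)) (d : Int) : List (List Int) :=
  if 0 ≤ d ∧ d < (((links.getD 0 []).length : Nat) : Int) then
    pvSetCell m d.toNat k.toNat ((links.getD d.toNat []).getD k.toNat 0)
  else m

def pvOuterStep (links : List (List Int)) (m : List (List Int)) (p : Int × List Int) : List (List Int) :=
  if 0 ≤ p.1 ∧ p.1 < ((links.length : Nat) : Int) then
    p.2.foldl (pvInnerStep links p.1) m
  else m

lemma pvAlt_eq_fold (links : List (List Int)) (conn : List (Int × List Int)) :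
    filter_links_py_alt links conn =
      conn.foldl (pvOuterStep links)
        (List.replicate (links.getD 0 []).length (List.replicate links.length (0 : Int))) := rfl

lemma pvIf_or {α : Type} (A B : Bool) (v x : α) :
    (if A = true then v else if B = true then v else x) = if (B || A) = true then v else x := by
  cases A <;> cases B <;> simp

lemma pvInner_char (links : List (List Int)) (k : Int) (ds : List Int)
    (hk0 : 0 ≤ k) (hk : k < (links.length : Int))
    (m : List (List Int)) (hm : pvShape (links.getD 0 []).length links.length m) :
    pvShape (links.getD 0 []).length links.length (ds.foldl (pvInnerStep links k) m) ∧
    ∀ d s, pvCell (ds.foldl (pvInnerStep links k) m) d s =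
      if (decide (s = k.toNat) && ds.contains ((d : Nat) : Int) && decide (d < (links.getD 0 []).length)) = true
      then (links.getD d []).getD s 0 else pvCell m d s := by
  induction ds generalizing m with
  | nil => exact ⟨hm, by intro d s; simp⟩
  | cons a ds ih =>
    have hstep : pvShape (links.getD 0 []).length links.length (pvInnerStep links k m a) := by
      unfold pvInnerStep
      split_ifs with hg
      · exact pvShape_set _ _ _ _ _ _ hm
      · exact hm
    obtain ⟨ihS, ihC⟩ := ih (pvInnerStep links k m a) hstep
    refine ⟨by simpa [List.foldl_cons] using ihS, ?_⟩
    intro d s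
    rw [List.foldl_cons, ihC d s]
    have hcell : pvCell (pvInnerStep links k m a) d s =
        if (decide (s = k.toNat) && (a == ((d : Nat) : Int)) && decide (d < (links.getD 0 []).length)) = true
        then (links.getD d []).getD s 0 else pvCell m d s := by
      by_cases hg : 0 ≤ a ∧ a < (((links.getD 0 []).length : Nat) : Int)
      · unfold pvInnerStep
        rw [if_pos hg, pvCell_set m a.toNat k.toNat d s _ (by rw [hm.1]; omega)
            (by rw [hm.2 a.toNat (by omega)]; omega)]
        by_cases h1 : a.toNat = d ∧ k.toNat = s
        · have ha : a = ((d : Nat) : Int) := by omega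
          have hd : d < (links.getD 0 []).length := by omega
          rw [if_pos h1, if_pos (by simp only [Bool.and_eq_true, decide_eq_true_eq, beq_iff_eq]; exact ⟨⟨by omega, ha⟩, hd⟩), h1.1, h1.2]
        · rw [if_neg h1, if_neg]
          simp only [Bool.and_eq_true, decide_eq_true_eq, beq_iff_eq]
          rintro ⟨⟨hs, ha⟩, hd⟩
          exact h1 ⟨by omega, by omega⟩
      · unfold pvInnerStep
        rw [if_neg hg, if_neg]
        simp only [Bool.and_eq_true, decide_eq_true_eq, beq_iff_eq]
        rintro ⟨⟨hs, ha⟩, hd⟩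
        exact hg ⟨by omega, by omega⟩
    rw [hcell, pvIf_or]
    congr 1
    rcases eq_or_ne a (((d : Nat)) : Int) with h | h
    · simp [h]; tauto
    · simp [h, Ne.symm h]

lemma pvFold_char (links : List (List Int)) (conn : List (Int × List Int))
    (m : List (List Int)) (hm : pvShape (links.getD 0 []).length links.length m) :
    pvShape (links.getD 0 []).length links.length (conn.foldl (pvOuterStep links) m) ∧
    ∀ d s, pvCell (conn.foldl (pvOuterStep links) m) d s =
      if pvConnB conn links.length (links.getD 0 []).length s d = true
      then (links.getD d []).getD s 0 else pvCell m d s := by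
  induction conn generalizing m with
  | nil => exact ⟨hm, by intro d s; simp [pvConnB]⟩
  | cons p conn ih =>
    have hstep : pvShape (links.getD 0 []).length links.length (pvOuterStep links m p) := by
      unfold pvOuterStep
      split_ifs with hg
      · exact (pvInner_char links p.1 p.2 hg.1 hg.2 m hm).1
      · exact hm
    obtain ⟨ihS, ihC⟩ := ih (pvOuterStep links m p) hstep
    refine ⟨by simpa [List.foldl_cons] using ihS, ?_⟩
    intro d s
    rw [List.foldl_cons, ihC d s]
    have hcell : pvCell (pvOuterStep links m p) d s =
        if (p.1 == (s : Int) && decide (s < links.length) && p.2.contains ((d : Nat) : Int) && decide (d < (links.getD 0 []).length)) = true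
        then (links.getD d []).getD s 0 else pvCell m d s := by
      by_cases hg : 0 ≤ p.1 ∧ p.1 < ((links.length : Nat) : Int)
      · unfold pvOuterStep
        rw [if_pos hg, (pvInner_char links p.1 p.2 hg.1 hg.2 m hm).2 d s]
        by_cases h1 : p.1 = (s : Int)
        · have : p.1.toNat = s := by omega
          have hsn : s < links.length := by omega
          simp [h1, hsn]
        · rw [if_neg, if_neg]
          · simp only [Bool.and_eq_true, beq_iff_eq]; rintro ⟨⟨⟨h, _⟩, _⟩, _⟩; exact h1 h
          · simp only [Bool.and_eq_true, decide_eq_true_eq]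
            rintro ⟨⟨hk, _⟩, _⟩
            exact h1 (by omega)
      · unfold pvOuterStep
        rw [if_neg hg, if_neg]
        simp only [Bool.and_eq_true, decide_eq_true_eq, beq_iff_eq]
        rintro ⟨⟨⟨hk, hsn⟩, _⟩, _⟩
        exact hg ⟨by omega, by omega⟩
    rw [hcell, pvIf_or]
    have hcons : pvConnB (p :: conn) links.length (links.getD 0 []).length s d =
        ((p.1 == (s : Int) && decide (s < links.length) && p.2.contains ((d : Nat) : Int) && decide (d < (links.getD 0 []).length)) ||
          pvConnB conn links.length (links.getD 0 []).length s d) := by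
      simp [pvConnB]
    rw [hcons]

lemma pvCell_init (ndst nsrc d s : Nat) :
    pvCell (List.replicate ndst (List.replicate nsrc (0 : Int))) d s = 0 := by
  unfold pvCell
  by_cases hd : d < ndst <;> by_cases hs : s < nsrc <;>
    simp [List.getD, hd, hs]

lemma pvLookup_char (conn : List (Int × List Int)) (nsrc ndst : Nat) (s d : Nat)
    (hs : s < nsrc) (hd : d < ndst) (hnd : (conn.map Prod.fst).Nodup) (v : Int) :
    (match conn.lookup ((s : Nat) : Int) with
      | some dsts => if ((d : Nat) : Int) ∈ dsts then v else 0
      | none => (0 : Int)) =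
    if pvConnB conn nsrc ndst s d = true then v else 0 := by
  induction conn with
  | nil => simp [pvConnB]
  | cons p conn ih =>
    simp only [List.map_cons, List.nodup_cons] at hnd
    by_cases hps : p.1 = ((s : Nat) : Int)
    · have hcb : pvConnB conn nsrc ndst s d = false := by
        simp only [pvConnB, List.any_eq_false]
        intro q hq
        simp only [Bool.and_eq_true, beq_iff_eq, decide_eq_true_eq, List.contains_eq_mem, not_and]
        rintro ⟨⟨h1, _⟩, _⟩
        exact absurd (List.mem_map.mpr ⟨q, hq, by rw [h1, hps]⟩) hnd.1
      have hlk : (p :: conn).lookup ((s : Nat) : Int) = some p.2 := by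
        have hb : (((s : Nat) : Int) == p.1) = true := by simp [hps.symm]
        show (match ((s : Nat) : Int) == p.1 with
          | true => some p.2
          | false => conn.lookup ((s : Nat) : Int)) = _
        rw [hb]
      rw [hlk]
      have hcb' : conn.any (fun p => p.1 == ((s : Nat) : Int) && decide (s < nsrc) &&
          p.2.contains ((d : Nat) : Int) && decide (d < ndst)) = false := hcb
      have hcc : pvConnB (p :: conn) nsrc ndst s d = p.2.contains ((d : Nat) : Int) := by
        simp only [pvConnB, List.any_cons, hcb', Bool.or_false]
        simp [hps, hs, hd]
      rw [hcc]
      simp [List.contains_eq_mem]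
    · have hlk : (p :: conn).lookup ((s : Nat) : Int) = conn.lookup ((s : Nat) : Int) := by
        have hb : (((s : Nat) : Int) == p.1) = false := by
          simp only [beq_eq_false_iff_ne]; exact fun h => hps h.symm
        show (match ((s : Nat) : Int) == p.1 with
          | true => some p.2
          | false => conn.lookup ((s : Nat) : Int)) = _
        rw [hb]
      have hcc : pvConnB (p :: conn) nsrc ndst s d = pvConnB conn nsrc ndst s d := by
        simp [pvConnB, hps]
      rw [hlk, hcc]
      exact ih hnd.2

-- ===== VERDICT (by name: the statement is the Claim_ definition above) =====
theorem filter_links_py_spec : Claim_equal_filter_links_py := by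
  unfold Claim_equal_filter_links_py Spec_filter_links_py
  intro links conn _ hpre
  obtain ⟨-, hnd, -⟩ := hpre
  rw [pvAlt_eq_fold]
  have hinit : pvShape (links.getD 0 []).length links.length
      (List.replicate (links.getD 0 []).length (List.replicate links.length (0 : Int))) := by
    refine ⟨by simp, ?_⟩
    intro d hd
    rw [List.getD_eq_getElem _ _ (by simpa using hd)]
    simp
  obtain ⟨hS, hC⟩ := pvFold_char links conn _ hinit
  apply List.ext_getElem
  · simpa [filter_links_py] using hS.1.symm
  · intro d h1 h2
    have hd : d < (links.getD 0 []).length := by simpa [filter_links_py] using h1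
    apply List.ext_getElem
    · have hrow := hS.2 d hd
      rw [List.getD_eq_getElem _ _ (by omega)] at hrow
      simpa [filter_links_py] using hrow.symm
    · intro s hs1 hs2
      have hsn : s < links.length := by simpa [filter_links_py] using hs1
      have hB : (List.foldl (pvOuterStep links) (List.replicate (links.getD 0 []).length
            (List.replicate links.length (0 : Int))) conn)[d][s] =
          pvCell (List.foldl (pvOuterStep links) (List.replicate (links.getD 0 []).length
            (List.replicate links.length (0 : Int))) conn) d s := by
        unfold pvCell
        rw [List.getD_eq_getElem _ _ h2, List.getD_eq_getElem _ _ hs2]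
      rw [hB, hC d s, pvCell_init]
      simp only [filter_links_py, List.getElem_map, List.getElem_range]
      exact pvLookup_char conn links.length (links.getD 0 []).length s d hsn hd hnd _
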